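-- pv_equiv track=rewrite | github.com/jchy20/how-much-backtrack | reasoning-gym/reasoning_gym/arc/arc_1d_tasks.py | transform_color_left_half_blocks
-- ===== SOURCE A (Python) =====
-- def transform_color_left_half_blocks(input_grid: list[int]) -> list[int]:
--     size = len(input_grid)
--     output = input_grid.copy()
--     i = 0
--
--     while i < size:
--         # detect start of a block of 2’s
--         if input_grid[i] == 2:
--             start = i
--             # advance to end of this block
--             while i < size and input_grid[i] == 2:
--                 i += 1
--             block_len = i - start
--             # only blocks of length ≥ 2 were generated, but we guard anyway
--             if block_len >= 2:
--                 half = block_len // 2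
--                 for offset in range(half):
--                     output[start + offset] = 8
--         else:
--             i += 1
--
--     return output
-- ===== SOURCE B (Python) =====
-- def transform_color_left_half_blocks(input_grid: list[int]) -> list[int]:
--     n = len(input_grid)
--     left = [0] * n   # left[i]: length of the 2-streak ending at i (0 if grid[i] != 2)
--     streak = 0
--     for i, v in enumerate(input_grid):
--         streak = streak + 1 if v == 2 else 0
--         left[i] = streak
--     right = [0] * n  # right[i]: length of the 2-streak starting at i
--     streak = 0
--     for i in range(n - 1, -1, -1):
--         streak = streak + 1 if input_grid[i] == 2 else 0
--         right[i] = streak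
--     # cell i is in the left half of its 2-block iff strictly more 2s follow it
--     # (within the block) than precede-and-include it: left[i] < right[i]
--     return [8 if l < r else v for v, l, r in zip(input_grid, left, right)]
-- ===== Notes on version B (the rewrite author's own statement) =====
-- stated objective: alternative
-- what changed: Replaces A's single-pass block detection (scan for a run of 2s, then overwrite its first half in a copied list) with two streak arrays (forward and backward 2-streak lengths) and a per-cell arithmetic rule left[i] < right[i] deciding membership in the left half, so no run is ever delimited or materialized.
import Mathlib
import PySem

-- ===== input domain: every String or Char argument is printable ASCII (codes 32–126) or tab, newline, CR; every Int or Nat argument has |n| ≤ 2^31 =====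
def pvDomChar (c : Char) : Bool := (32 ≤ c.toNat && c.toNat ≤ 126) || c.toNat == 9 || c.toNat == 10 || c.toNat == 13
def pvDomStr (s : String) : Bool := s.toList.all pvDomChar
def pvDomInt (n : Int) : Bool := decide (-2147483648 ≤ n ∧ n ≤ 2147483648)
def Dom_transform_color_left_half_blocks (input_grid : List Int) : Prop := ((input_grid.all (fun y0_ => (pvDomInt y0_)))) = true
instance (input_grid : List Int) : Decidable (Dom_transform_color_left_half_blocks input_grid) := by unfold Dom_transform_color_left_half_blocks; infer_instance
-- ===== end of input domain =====

-- B replaces A's run detection and in-place half-overwrite with two streak arrays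
-- (forward/backward consecutive-2 counts) and a per-cell rule left[i] < right[i];
-- same behaviour, a genuinely different (staged, index-free) decomposition.

-- ===== PORT A =====
-- inner `while i < size and input_grid[i] == 2: i += 1` (fuel only makes it total;
-- fuel = size - i always suffices, since the condition forces i < size)
def pvBlockEndF : Nat → List Int → Nat → Nat
  | 0, _, i => i
  | f + 1, grid, i =>
      if i < grid.length ∧ grid.getD i 0 = 2 then pvBlockEndF f grid (i + 1) else i

def pvBlockEnd (grid : List Int) (i : Nat) : Nat := pvBlockEndF (grid.length - i) grid i

-- `for offset in range(half): output[start + offset] = 8`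
def pvWriteHalf (out : List Int) (start half : Nat) : List Int :=
  (List.range half).foldl (fun o off => o.set (start + off) 8) out

-- outer while loop of A (start = i, j = pvBlockEnd grid i, block_len = j - i inlined;
-- fuel only makes it total: i strictly increases, so fuel = size suffices)
def pvLoopAF : Nat → List Int → List Int → Nat → List Int
  | 0, _, out, _ => out
  | f + 1, grid, out, i =>
      if i < grid.length then
        if grid.getD i 0 = 2 then
          pvLoopAF f grid
            (if pvBlockEnd grid i - i ≥ 2 then
              pvWriteHalf out i ((pvBlockEnd grid i - i) / 2) else out)
            (pvBlockEnd grid i)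
        else pvLoopAF f grid out (i + 1)
      else out

def transform_color_left_half_blocks (input_grid : List Int) : List Int :=
  pvLoopAF input_grid.length input_grid input_grid 0

-- ===== PORT B =====
-- the streak loop: carried accumulator `streak`, one output per element
-- (`streak = streak + 1 if v == 2 else 0; arr[i] = streak`)
def pvStreaksFrom (s : Nat) : List Int → List Nat
  | [] => []
  | v :: vs =>
      let s' := if v = 2 then s + 1 else 0
      s' :: pvStreaksFrom s' vs

-- `left` forward pass; `right` is the same loop run over the reversed indices;
-- final list comprehension over zip(grid, left, right)
def transform_color_left_half_blocks_alt (input_grid : List Int) : List Int :=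
  (input_grid.zip ((pvStreaksFrom 0 input_grid).zip
      ((pvStreaksFrom 0 input_grid.reverse).reverse))).map
    (fun p => if p.2.1 < p.2.2 then 8 else p.1)

-- ===== PRECONDITION & SPEC =====
def Spec_transform_color_left_half_blocks (input_grid : List Int) (out : List Int) : Prop := out = transform_color_left_half_blocks_alt input_grid
instance (input_grid : List Int) (out : List Int) : Decidable (Spec_transform_color_left_half_blocks input_grid out) := by unfold Spec_transform_color_left_half_blocks; infer_instance

-- ===== CLAIM (what is proved, stated in full; the proofs are below) =====
def Claim_equal_transform_color_left_half_blocks : Prop := ∀ (input_grid : List Int), Dom_transform_color_left_half_blocks input_grid → Spec_transform_color_left_half_blocks input_grid (transform_color_left_half_blocks input_grid)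

-- ===== LEMMAS AND PROOFS =====

theorem pvBlockEndF_char (f : Nat) (grid : List Int) (i : Nat) (hf : grid.length ≤ i + f) :
    pvBlockEndF f grid i = i + ((grid.drop i).takeWhile (· == (2 : Int))).length := by
  induction f generalizing i with
  | zero =>
      have : grid.drop i = [] := List.drop_eq_nil_of_le (by omega)
      simp [pvBlockEndF, this]
  | succ n ih =>
      rw [pvBlockEndF]
      by_cases h1 : i < grid.length
      · have hd : grid.drop i = grid[i] :: grid.drop (i + 1) := List.drop_eq_getElem_cons h1
        have hg : grid.getD i 0 = grid[i] := List.getD_eq_getElem grid 0 h1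
        by_cases h2 : grid.getD i 0 = 2
        · rw [if_pos ⟨h1, h2⟩, ih (i + 1) (by omega), hd, List.takeWhile_cons]
          rw [hg] at h2
          simp [h2]
          omega
        · rw [if_neg (by tauto), hd, List.takeWhile_cons]
          rw [hg] at h2
          simp [h2]
      · rw [if_neg (by tauto)]
        have : grid.drop i = [] := List.drop_eq_nil_of_le (by omega)
        simp [this]

theorem pvBlockEnd_char (grid : List Int) (i : Nat) :
    pvBlockEnd grid i = i + ((grid.drop i).takeWhile (· == (2 : Int))).length :=
  pvBlockEndF_char (grid.length - i) grid i (by omega)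

theorem pvWriteHalf_eq (h : Nat) (out : List Int) (i : Nat) (hle : i + h ≤ out.length) :
    pvWriteHalf out i h = out.take i ++ List.replicate h 8 ++ out.drop (i + h) := by
  induction h with
  | zero => simp [pvWriteHalf]
  | succ n ih =>
      have hle' : i + n ≤ out.length := by omega
      have hlt : i + n < out.length := by omega
      unfold pvWriteHalf at *
      rw [List.range_succ, List.foldl_append, ih hle']
      simp only [List.foldl_cons, List.foldl_nil]
      have hdrop : out.drop (i + n) = out[i + n] :: out.drop (i + n + 1) :=
        List.drop_eq_getElem_cons hlt
      rw [hdrop]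
      have hlen : (out.take i ++ List.replicate n (8:Int)).length = i + n := by
        rw [List.length_append, List.length_take, List.length_replicate]; omega
      rw [List.append_assoc, ← List.append_assoc, List.set_append,
        if_neg (by rw [hlen]; omega), hlen, Nat.sub_self]
      simp [List.replicate_succ', List.append_assoc]
      rw [show i + (n + 1) = i + n + 1 by omega]
      rw [hdrop]
      rfl

-- end value of the streak accumulator after a pass
def pvEnd (s : Nat) : List Int → Nat
  | [] => s
  | v :: vs => pvEnd (if v = 2 then s + 1 else 0) vs

theorem pvStreaksFrom_append (s : Nat) (as bs : List Int) :
    pvStreaksFrom s (as ++ bs) = pvStreaksFrom s as ++ pvStreaksFrom (pvEnd s as) bs := by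
  induction as generalizing s with
  | nil => rfl
  | cons x xs ih => simp [pvStreaksFrom, pvEnd, ih]

theorem pvEnd_append (s : Nat) (as bs : List Int) :
    pvEnd s (as ++ bs) = pvEnd (pvEnd s as) bs := by
  induction as generalizing s with
  | nil => rfl
  | cons x xs ih => simp [pvEnd, ih]

theorem pvStreaksFrom_cons_ne (s : Nat) (x : Int) (xs : List Int) (hx : x ≠ 2) :
    pvStreaksFrom s (x :: xs) = 0 :: pvStreaksFrom 0 xs := by
  simp [pvStreaksFrom, hx]

theorem pvStreaksFrom_head_ne (s : Nat) (l : List Int)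
    (hl : l = [] ∨ ∃ y ys, l = y :: ys ∧ y ≠ 2) :
    pvStreaksFrom s l = pvStreaksFrom 0 l := by
  rcases hl with rfl | ⟨y, ys, rfl, hy⟩
  · rfl
  · rw [pvStreaksFrom_cons_ne s y ys hy, pvStreaksFrom_cons_ne 0 y ys hy]

theorem pvStreaksFrom_replicate (L s : Nat) :
    pvStreaksFrom s (List.replicate L 2) = (List.range L).map (fun i => s + i + 1) := by
  induction L generalizing s with
  | zero => rfl
  | succ n ih =>
      rw [List.replicate_succ, List.range_succ_eq_map,
        show pvStreaksFrom s ((2:Int) :: List.replicate n 2)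
            = (s + 1) :: pvStreaksFrom (s + 1) (List.replicate n 2) from by
          simp [pvStreaksFrom],
        ih]
      simp only [List.map_cons, List.map_map]
      refine congrArg₂ List.cons (by omega) ?_
      apply List.map_congr_left
      intro i _
      simp
      omega

theorem pvEnd_last_ne (s : Nat) (as : List Int) (x : Int) (hx : x ≠ 2) :
    pvEnd s (as ++ [x]) = 0 := by
  rw [pvEnd_append]
  simp [pvEnd, hx]

theorem takeWhile_head_ne (l : List Int) (hl : l.takeWhile (· == (2 : Int)) = []) :
    l = [] ∨ ∃ y ys, l = y :: ys ∧ y ≠ 2 := by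
  cases l with
  | nil => exact Or.inl rfl
  | cons y ys =>
      right
      refine ⟨y, ys, rfl, ?_⟩
      intro h
      subst h
      simp at hl

theorem alt_nil : transform_color_left_half_blocks_alt [] = [] := rfl

theorem alt_cons_ne (x : Int) (rest : List Int) (hx : x ≠ 2) :
    transform_color_left_half_blocks_alt (x :: rest)
      = x :: transform_color_left_half_blocks_alt rest := by
  unfold transform_color_left_half_blocks_alt
  have hL : pvStreaksFrom 0 (x :: rest) = 0 :: pvStreaksFrom 0 rest :=
    pvStreaksFrom_cons_ne 0 x rest hx
  have hRrev : pvStreaksFrom 0 (x :: rest).reverse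
      = pvStreaksFrom 0 rest.reverse ++ [0] := by
    rw [List.reverse_cons, pvStreaksFrom_append]
    simp [pvStreaksFrom, hx]
  rw [hL, hRrev]
  simp [List.zip_cons_cons]

theorem alt_two_run (L : Nat) (rest : List Int) (hL : 1 ≤ L)
    (hr : rest.takeWhile (· == (2 : Int)) = []) :
    transform_color_left_half_blocks_alt (List.replicate L 2 ++ rest)
      = List.replicate (L / 2) 8 ++ List.replicate (L - L / 2) 2
        ++ transform_color_left_half_blocks_alt rest := by
  have hhead := takeWhile_head_ne rest hr
  unfold transform_color_left_half_blocks_alt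
  -- left streaks split
  have hLeft : pvStreaksFrom 0 (List.replicate L 2 ++ rest)
      = (List.range L).map (fun i => i + 1) ++ pvStreaksFrom 0 rest := by
    rw [pvStreaksFrom_append, pvStreaksFrom_head_ne _ _ hhead, pvStreaksFrom_replicate]
    simp
  -- right streaks split
  have hEnd0 : pvEnd 0 rest.reverse = 0 := by
    rcases hhead with rfl | ⟨y, ys, rfl, hy⟩
    · rfl
    · rw [List.reverse_cons]; exact pvEnd_last_ne 0 ys.reverse y hy
  have hRight : (pvStreaksFrom 0 (List.replicate L 2 ++ rest).reverse).reverse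
      = ((List.range L).map (fun i => i + 1)).reverse
        ++ (pvStreaksFrom 0 rest.reverse).reverse := by
    rw [List.reverse_append, List.reverse_replicate, pvStreaksFrom_append, hEnd0,
      pvStreaksFrom_replicate, List.reverse_append]
    simp
  rw [hLeft, hRight]
  -- zip distributes over the equal-length prefixes
  have hlen1 : ((List.range L).map (fun i => i + 1)).length = L := by simp
  have hlen1r : (((List.range L).map (fun i => i + 1)).reverse).length = L := by simp
  have hzip1 : ((List.range L).map (fun i => i + 1) ++ pvStreaksFrom 0 rest).zip
        (((List.range L).map (fun i => i + 1)).reverse ++ (pvStreaksFrom 0 rest.reverse).reverse)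
      = ((List.range L).map (fun i => i + 1)).zip (((List.range L).map (fun i => i + 1)).reverse)
        ++ (pvStreaksFrom 0 rest).zip ((pvStreaksFrom 0 rest.reverse).reverse) := by
    apply List.zip_append
    rw [hlen1, hlen1r]
  rw [hzip1]
  have hzip2 : (List.replicate L (2:Int) ++ rest).zip
        (((List.range L).map (fun i => i + 1)).zip (((List.range L).map (fun i => i + 1)).reverse)
          ++ (pvStreaksFrom 0 rest).zip ((pvStreaksFrom 0 rest.reverse).reverse))
      = (List.replicate L (2:Int)).zip
          (((List.range L).map (fun i => i + 1)).zip (((List.range L).map (fun i => i + 1)).reverse))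
        ++ rest.zip ((pvStreaksFrom 0 rest).zip ((pvStreaksFrom 0 rest.reverse).reverse)) := by
    apply List.zip_append
    simp
  rw [hzip2, List.map_append]
  congr 1
  -- the block itself: element i is 8 iff i + 1 < L - i iff i < L / 2
  apply List.ext_getElem
  · simp [hlen1r]; omega
  · intro i h1 h2
    have hiL : i < L := by simp at h1; omega
    rw [List.getElem_map, List.getElem_zip, List.getElem_zip, List.getElem_reverse,
      List.getElem_replicate]
    simp only [List.getElem_map, List.getElem_range, List.length_map, List.length_range]
    have hcond : (i + 1 < L - 1 - i + 1) ↔ (i < L / 2) := by omega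
    by_cases hc : i < L / 2
    · rw [if_pos (hcond.mpr hc)]
      rw [List.getElem_append_left (by simp; omega), List.getElem_replicate]
    · rw [if_neg (fun h => hc (hcond.mp h))]
      rw [List.getElem_append_right (by simp; omega), List.getElem_replicate]

theorem takeWhile_eq_replicate (c : Int) (l : List Int) :
    l.takeWhile (· == c) = List.replicate (l.takeWhile (· == c)).length c := by
  induction l with
  | nil => simp
  | cons x xs ih =>
      by_cases hx : x = c
      · subst hx; simpa [List.takeWhile_cons, List.replicate_succ] using ih
      · simp [hx]

theorem takeWhile_dropWhile_nil (p : Int → Bool) (l : List Int) :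
    (l.dropWhile p).takeWhile p = [] := by
  induction l with
  | nil => simp
  | cons x xs ih =>
      by_cases hx : p x
      · simpa [hx] using ih
      · simp [hx]

theorem pvLoopAF_eq (f : Nat) (grid out : List Int) (i : Nat) (hf : grid.length ≤ i + f)
    (hlen : out.length = grid.length) (hdrop : out.drop i = grid.drop i) :
    pvLoopAF f grid out i
      = out.take i ++ transform_color_left_half_blocks_alt (grid.drop i) := by
  induction f generalizing out i with
  | zero =>
      have hg : grid.drop i = [] := List.drop_eq_nil_of_le (by omega)
      have ho : out.take i = out := List.take_of_length_le (by omega)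
      rw [pvLoopAF, hg, ho, alt_nil, List.append_nil]
  | succ n ih =>
      rw [pvLoopAF]
      by_cases h1 : i < grid.length
      · rw [if_pos h1]
        have hgi : grid.getD i 0 = grid[i] := List.getD_eq_getElem grid 0 h1
        have hdg : grid.drop i = grid[i] :: grid.drop (i + 1) := List.drop_eq_getElem_cons h1
        by_cases h2 : grid.getD i 0 = 2
        · rw [if_pos h2]
          have hg2 : grid[i] = (2:Int) := by rw [← hgi]; exact h2
          have hbe : pvBlockEnd grid i
              = i + ((grid.drop i).takeWhile (· == (2:Int))).length := pvBlockEnd_char grid i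
          set L := ((grid.drop i).takeWhile (· == (2:Int))).length with hLdef
          set R := (grid.drop i).dropWhile (· == (2:Int)) with hRdef
          have hL1 : 1 ≤ L := by
            rw [hLdef, hdg, List.takeWhile_cons]
            simp [hg2]
          have hLle : L ≤ grid.length - i := by
            have h := (List.takeWhile_prefix (· == (2:Int)) (l := grid.drop i)).length_le
            simp only [List.length_drop] at h
            omega
          have hsplit : grid.drop i = List.replicate L 2 ++ R := by
            conv_lhs => rw [← List.takeWhile_append_dropWhile (p := (· == (2:Int)))
              (l := grid.drop i)]
            rw [← hRdef, ← takeWhile_eq_replicate]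
          have hRtw : R.takeWhile (· == (2:Int)) = [] := takeWhile_dropWhile_nil _ _
          rw [hbe, Nat.add_sub_cancel_left]
          have hhalf : i + L / 2 ≤ out.length := by omega
          have hout2 : (if L ≥ 2 then pvWriteHalf out i (L / 2) else out)
              = out.take i ++ List.replicate (L / 2) 8 ++ out.drop (i + L / 2) := by
            by_cases hc : L ≥ 2
            · rw [if_pos hc]; exact pvWriteHalf_eq (L / 2) out i hhalf
            · have hL1' : L = 1 := by omega
              rw [if_neg hc, hL1']
              simp [List.take_append_drop]
          rw [hout2]
          have hlen2 : (out.take i ++ List.replicate (L / 2) 8 ++ out.drop (i + L / 2)).length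
              = grid.length := by
            simp [List.length_append, List.length_take, List.length_replicate,
              List.length_drop]
            omega
          have hdout : out.drop (i + L / 2) = List.replicate (L - L / 2) 2 ++ R := by
            have e1 : out.drop (i + L / 2) = (out.drop i).drop (L / 2) := by
              rw [List.drop_drop]
            rw [e1, hdrop, hsplit, List.drop_append, List.drop_replicate]
            have : L / 2 - (List.replicate L (2:Int)).length = 0 := by
              rw [List.length_replicate]; omega
            rw [this, List.drop_zero]
          have hdrop2 : (out.take i ++ List.replicate (L / 2) 8
                ++ out.drop (i + L / 2)).drop (i + L) = grid.drop (i + L) := by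
            rw [List.drop_append]
            have hl1 : (out.take i ++ List.replicate (L / 2) (8:Int)).length = i + L / 2 := by
              rw [List.length_append, List.length_take, List.length_replicate]; omega
            rw [List.drop_eq_nil_of_le (by rw [hl1]; omega), List.nil_append, hl1,
              List.drop_drop]
            rw [show i + L / 2 + (i + L - (i + L / 2)) = i + L from by omega]
            have e3 : out.drop (i + L) = (out.drop i).drop L := by
              rw [List.drop_drop]
            have e4 : grid.drop (i + L) = (grid.drop i).drop L := by
              rw [List.drop_drop]
            rw [e3, e4, hdrop]
          rw [ih _ (i + L) (by omega) hlen2 hdrop2]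
          have hgdropR : grid.drop (i + L) = R := by
            have e4 : grid.drop (i + L) = (grid.drop i).drop L := by
              rw [List.drop_drop]
            rw [e4, hsplit, List.drop_append, List.drop_replicate]
            simp
          have htake : (out.take i ++ List.replicate (L / 2) 8
                ++ out.drop (i + L / 2)).take (i + L)
              = out.take i ++ List.replicate (L / 2) 8 ++ List.replicate (L - L / 2) 2 := by
            rw [List.take_append]
            have hl1 : (out.take i ++ List.replicate (L / 2) (8:Int)).length = i + L / 2 := by
              rw [List.length_append, List.length_take, List.length_replicate]; omega
            rw [List.take_of_length_le (by rw [hl1]; omega), hl1, hdout,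
              List.take_append,
              List.take_of_length_le (i := i + L - (i + L / 2))
                (l := List.replicate (L - L / 2) (2:Int)) (by rw [List.length_replicate]; omega)]
            have : i + L - (i + L / 2) - (List.replicate (L - L / 2) (2:Int)).length = 0 := by
              rw [List.length_replicate]; omega
            rw [this, List.take_zero, List.append_nil]
          rw [htake, hgdropR, hsplit, alt_two_run L R hL1 hRtw]
          simp [List.append_assoc]
        · rw [if_neg h2]
          have hdrop' : out.drop (i + 1) = grid.drop (i + 1) := by
            rw [← List.tail_drop, ← List.tail_drop, hdrop]
          rw [ih out (i + 1) (by omega) hlen hdrop']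
          have hne : grid[i] ≠ (2:Int) := by rw [← hgi]; exact h2
          rw [hdg, alt_cons_ne _ _ hne]
          have hiout : i < out.length := by omega
          have houti : out[i]? = some grid[i] := by
            have e1 : (out.drop i)[0]? = out[i]? := by
              simp [List.getElem?_drop]
            rw [← e1, hdrop, hdg]
            simp
          rw [List.take_add_one, houti]
          simp [List.append_assoc]
      · rw [if_neg h1]
        have hg : grid.drop i = [] := List.drop_eq_nil_of_le (by omega)
        have ho : out.take i = out := List.take_of_length_le (by omega)
        rw [hg, ho, alt_nil, List.append_nil]

-- ===== VERDICT (by name: the statement is the Claim_ definition above) =====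
theorem transform_color_left_half_blocks_spec : Claim_equal_transform_color_left_half_blocks := by
  intro g _
  unfold Spec_transform_color_left_half_blocks transform_color_left_half_blocks
  simpa using pvLoopAF_eq g.length g g 0 (by omega) rfl rfl
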